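-- pv_equiv track=rewrite | github.com/DataRohit/Data-Structures-and-Algorithms | 19_queue/10_sum_max_min.py | sum_of_max_and_min
-- ===== SOURCE A (Python) =====
-- from collections import deque
--
-- def sum_of_max_and_min(nums, n, k):
--     # Initialize dequeue for max element index and min element index
--     max_ele_idx = deque()
--     min_ele_idx = deque()
--
--     # Process first window
--     for i in range(k):
--         # While last element is smaller than current element
--         while max_ele_idx and nums[max_ele_idx[-1]] <= nums[i]:
--             # Remove the last element from the deque
--             max_ele_idx.pop()
--
--         # Push current larger element to max element array
--         max_ele_idx.append(i)
--
--         # While last element is larger than current element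
--         while min_ele_idx and nums[min_ele_idx[-1]] >= nums[i]:
--             # Remove the last element from the deque
--             min_ele_idx.pop()
--
--         # Push the current smaller element to deque
--         min_ele_idx.append(i)
--
--     # Initialize ans variable to store the final sum
--     ans = 0
--
--     # Traverse the remaining elements
--     for i in range(k, n):
--         # Calculate the ans
--         ans += nums[max_ele_idx[0]] + nums[min_ele_idx[0]]
--
--         # Move to next window
--
--         # Loop till the element at front of max_ele_idx is not in window
--         while max_ele_idx and max_ele_idx[0] <= i - k:
--             # Pop the element
--             max_ele_idx.popleft()
--
--         # Loop till the element at front of min_ele_idx is not in window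
--         while min_ele_idx and min_ele_idx[0] <= i - k:
--             # Pop the element
--             min_ele_idx.popleft()
--
--         # While last element is smaller than current element
--         while max_ele_idx and nums[max_ele_idx[-1]] <= nums[i]:
--             # Remove the last element from the deque
--             max_ele_idx.pop()
--
--         # Push current larger element to max element array
--         max_ele_idx.append(i)
--
--         # While last element is larger than current element
--         while min_ele_idx and nums[min_ele_idx[-1]] >= nums[i]:
--             # Remove the last element from the deque
--             min_ele_idx.pop()
--
--         # Push the current smaller element to deque
--         min_ele_idx.append(i)
--
--     # Calculate the ans
--     ans += nums[max_ele_idx[0]] + nums[min_ele_idx[0]]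
--
--     # Return the answer
--     return ans
-- ===== SOURCE B (Python) =====
-- def sum_of_max_and_min(nums, n, k):
--     # Direct per-window scan, no deques: sum max+min of each window ending at e.
--     # The do-while mirrors the task's shape: the first window (ending at k-1) is
--     # always counted, then e advances while e < n.
--     ans = 0
--     e = k - 1
--     while True:
--         hi = lo = nums[e]
--         for j in range(e - k + 1, e):
--             v = nums[j]
--             if v > hi:
--                 hi = v
--             if v < lo:
--                 lo = v
--         ans += hi + lo
--         e += 1
--         if e >= n:
--             return ans
-- ===== Notes on version B (the rewrite author's own statement) =====
-- stated objective: simpler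
-- what changed: Replaces the two monotonic index deques and their two-phase sliding-window maintenance with a do-while over window ends that finds each window's max and min by a plain inner scan.
import Mathlib
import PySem

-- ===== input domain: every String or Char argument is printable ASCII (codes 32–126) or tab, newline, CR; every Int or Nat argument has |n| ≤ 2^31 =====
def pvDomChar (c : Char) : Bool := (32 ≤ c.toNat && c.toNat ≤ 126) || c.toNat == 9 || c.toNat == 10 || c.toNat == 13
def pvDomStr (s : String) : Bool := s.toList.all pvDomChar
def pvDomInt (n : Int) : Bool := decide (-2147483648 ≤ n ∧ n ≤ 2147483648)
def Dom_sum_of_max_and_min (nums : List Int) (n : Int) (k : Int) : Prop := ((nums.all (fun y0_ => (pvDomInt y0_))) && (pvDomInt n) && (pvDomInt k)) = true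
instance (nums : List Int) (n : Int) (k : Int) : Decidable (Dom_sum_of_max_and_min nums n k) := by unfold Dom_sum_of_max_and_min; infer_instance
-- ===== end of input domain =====

-- B replaces A's two monotonic index deques with a do-while over window ends that finds each
-- window's max and min by a plain inner scan: simpler code, same windows, same return value.


-- ===== PORT A =====
-- nums[j]; Pre_ keeps every accessed index in range, so the default 0 is never taken there
def pvG (nums : List Int) (j : Int) : Int := PySem.List.pyGetD nums j 0

-- 'while d and p(d[-1]): d.pop()' : repeated pop from the back = dropWhile on the reverse
def pvPopBack (p : Int → Bool) (d : List Int) : List Int := (d.reverse.dropWhile p).reverse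

-- 'while max_ele_idx and nums[max_ele_idx[-1]] <= nums[i]: pop' then 'append(i)'
def pvPushMax (nums : List Int) (d : List Int) (i : Int) : List Int :=
  pvPopBack (fun j => decide (pvG nums j ≤ pvG nums i)) d ++ [i]

-- 'while min_ele_idx and nums[min_ele_idx[-1]] >= nums[i]: pop' then 'append(i)'
def pvPushMin (nums : List Int) (d : List Int) (i : Int) : List Int :=
  pvPopBack (fun j => decide (pvG nums j ≥ pvG nums i)) d ++ [i]

-- 'while d and d[0] <= c: d.popleft()'
def pvExpire (d : List Int) (c : Int) : List Int := d.dropWhile (fun a => decide (a ≤ c))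

-- body of A's first loop (state: the two deques, front at head)
def pvStep1 (nums : List Int) (st : List Int × List Int) (i : Int) : List Int × List Int :=
  (pvPushMax nums st.1 i, pvPushMin nums st.2 i)

-- body of A's second loop (state: the two deques and ans); d[0] via headD, Pre_ keeps d nonempty
def pvStep2 (nums : List Int) (k : Int) (st : List Int × List Int × Int) (i : Int) :
    List Int × List Int × Int :=
  let ans := st.2.2 + pvG nums (st.1.headD 0) + pvG nums (st.2.1.headD 0)
  (pvPushMax nums (pvExpire st.1 (i - k)) i,
   pvPushMin nums (pvExpire st.2.1 (i - k)) i,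
   ans)

def sum_of_max_and_min (nums : List Int) (n : Int) (k : Int) : Int :=
  let st0 := (PySem.List.pyRange 0 k).foldl (pvStep1 nums) ([], [])
  let st := (PySem.List.pyRange k n).foldl (pvStep2 nums k) (st0.1, st0.2, 0)
  st.2.2 + pvG nums (st.1.headD 0) + pvG nums (st.2.1.headD 0)

-- ===== PORT B =====
-- B's inner loop: hi = lo = nums[e]; for j in range(e-k+1, e): update hi, lo
def pvWinScan (nums : List Int) (k : Int) (i : Int) : Int × Int :=
  (PySem.List.pyRange (i - k + 1) i).foldl
    (fun hl j =>
      let v := pvG nums j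
      (if v > hl.1 then v else hl.1, if v < hl.2 then v else hl.2))
    (pvG nums i, pvG nums i)

-- B's do-while: add the window ending at e, advance, stop once e ≥ n
def pvBLoop (nums : List Int) (k n e ans : Int) : Int :=
  let hl := pvWinScan nums k e
  let ans' := ans + (hl.1 + hl.2)
  if e + 1 < n then pvBLoop nums k n (e + 1) ans' else ans'
termination_by (n - (e + 1)).toNat
decreasing_by omega

def sum_of_max_and_min_alt (nums : List Int) (n : Int) (k : Int) : Int :=
  pvBLoop nums k n (k - 1) 0

-- ===== PRECONDITION & SPEC =====
-- Exactly the inputs on which the Python A returns (otherwise it raises IndexError: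
-- k ≤ 0 empties the deques, k > len(nums) or n > len(nums) indexes past the end).
def Pre_sum_of_max_and_min (nums : List Int) (n : Int) (k : Int) : Prop :=
  1 ≤ k ∧ k ≤ (nums.length : Int) ∧ n ≤ (nums.length : Int)
instance (nums : List Int) (n : Int) (k : Int) : Decidable (Pre_sum_of_max_and_min nums n k) := by
  unfold Pre_sum_of_max_and_min; infer_instance

def pvWitness_sum_of_max_and_min : List Int × Int × Int := ([1, 3, 2], 3, 2)

def Spec_sum_of_max_and_min (nums : List Int) (n : Int) (k : Int) (out : Int) : Prop :=
  out = sum_of_max_and_min_alt nums n k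
instance (nums : List Int) (n : Int) (k : Int) (out : Int) : Decidable (Spec_sum_of_max_and_min nums n k out) := by
  unfold Spec_sum_of_max_and_min; infer_instance

-- ===== CLAIM (what is proved, stated in full; the proofs are below) =====
def Claim_equal_sum_of_max_and_min : Prop := ∀ (nums : List Int) (n : Int) (k : Int), Dom_sum_of_max_and_min nums n k → Pre_sum_of_max_and_min nums n k → Spec_sum_of_max_and_min nums n k (sum_of_max_and_min nums n k)

-- ===== LEMMAS AND PROOFS =====

-- the monotone-deque invariant of A, stated for the MAX deque of the score function g;
-- the MIN deque is the same invariant for (fun j => -(g j))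
def DInv (g : Int → Int) (L R : Int) (d : List Int) : Prop :=
  d ≠ [] ∧ d.Pairwise (· < ·) ∧ d.Pairwise (fun a b => g b ≤ g a) ∧
  (∀ a ∈ d, L ≤ a) ∧ d.getLast? = some R ∧
  (∀ j, L ≤ j → j ≤ R → ∃ a ∈ d, j ≤ a ∧ g j ≤ g a)

def pvPushG (g : Int → Int) (d : List Int) (i : Int) : List Int :=
  pvPopBack (fun j => decide (g j ≤ g i)) d ++ [i]

theorem head?_mem' {α : Type} {l : List α} {x : α} (h : l.head? = some x) : x ∈ l := by
  cases l with
  | nil => simp at h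
  | cons a t => simp at h; simp [h]

theorem getLast?_mem' {α : Type} {l : List α} {x : α} (h : l.getLast? = some x) : x ∈ l := by
  rw [List.getLast?_eq_head?_reverse] at h
  have : x ∈ l.reverse := head?_mem' h
  simpa using this

theorem pushMax_eq (nums : List Int) : pvPushMax nums = pvPushG (pvG nums) := by
  rfl

theorem pushMin_eq (nums : List Int) : pvPushMin nums = pvPushG (fun j => -(pvG nums j)) := by
  funext d i
  unfold pvPushMin pvPushG
  congr 2
  funext j
  simp only [ge_iff_le, decide_eq_decide]
  omega

theorem mem_popBack_or {p : Int → Bool} {d : List Int} {a : Int} (h : a ∈ d) :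
    a ∈ pvPopBack p d ∨ p a = true := by
  have h1 : a ∈ d.reverse := by simpa using h
  rw [← List.takeWhile_append_dropWhile (p := p) (l := d.reverse), List.mem_append] at h1
  rcases h1 with h1 | h1
  · exact Or.inr (List.mem_takeWhile_imp h1)
  · exact Or.inl (by simp [pvPopBack, h1])

theorem head?_dropWhile_false {α : Type} {p : α → Bool} {l : List α} {x : α}
    (h : (l.dropWhile p).head? = some x) : p x = false := by
  induction l with
  | nil => simp at h
  | cons a t ih =>
    by_cases hpa : p a = true
    · rw [List.dropWhile_cons_of_pos hpa] at h; exact ih h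
    · rw [List.dropWhile_cons_of_neg hpa] at h
      simp at h
      subst h
      simpa using hpa

theorem popBack_getLast_not {p : Int → Bool} {d : List Int} {x : Int}
    (h : (pvPopBack p d).getLast? = some x) : p x = false := by
  unfold pvPopBack at h
  rw [List.getLast?_eq_head?_reverse, List.reverse_reverse] at h
  exact head?_dropWhile_false h

theorem popBack_sublist (p : Int → Bool) (d : List Int) : (pvPopBack p d).Sublist d := by
  unfold pvPopBack
  have := (List.dropWhile_sublist (l := d.reverse) p).reverse
  simpa using this

theorem pairwise_last_rel {R : Int → Int → Prop} {l : List Int} {x : Int}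
    (hp : l.Pairwise R) (hl : l.getLast? = some x) : ∀ a ∈ l, a = x ∨ R a x := by
  induction l with
  | nil => simp
  | cons a t ih =>
    rw [List.pairwise_cons] at hp
    intro b hb
    cases t with
    | nil =>
      simp at hl hb
      subst hl; subst hb; exact Or.inl rfl
    | cons c t' =>
      have hl' : (c :: t').getLast? = some x := by
        rw [List.getLast?_cons_cons] at hl; exact hl
      rcases List.mem_cons.mp hb with hb | hb
      · subst hb
        exact Or.inr (hp.1 x (getLast?_mem' hl'))
      · exact ih hp.2 hl' b hb

theorem pairwise_head_rel {R : Int → Int → Prop} {l : List Int} {h : Int}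
    (hp : l.Pairwise R) (hl : l.head? = some h) : ∀ a ∈ l, a = h ∨ R h a := by
  cases l with
  | nil => simp
  | cons b t =>
    simp at hl
    subst hl
    rw [List.pairwise_cons] at hp
    intro a ha
    rcases List.mem_cons.mp ha with ha | ha
    · exact Or.inl ha
    · exact Or.inr (hp.1 a ha)

theorem DInv_singleton (g : Int → Int) (i : Int) : DInv g i i [i] := by
  refine ⟨by simp, by simp, by simp, by simp, by simp, ?_⟩
  intro j h1 h2
  have : j = i := le_antisymm h2 h1
  exact ⟨i, by simp, by omega, by rw [this]⟩

theorem DInv_push {g : Int → Int} {L R : Int} {d : List Int} (hd : DInv g L R d) :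
    DInv g L (R + 1) (pvPushG g d (R + 1)) := by
  obtain ⟨hne, hlt, hval, hLb, hlast, hcov⟩ := hd
  have hleR : ∀ a ∈ d, a ≤ R := by
    intro a ha
    rcases pairwise_last_rel hlt hlast a ha with h | h
    · omega
    · omega
  set p : Int → Bool := fun j => decide (g j ≤ g (R + 1)) with hp
  set d₁ := pvPopBack p d with hd₁
  have hsub : d₁.Sublist d := popBack_sublist p d
  have hmem₁ : ∀ a ∈ d₁, a ∈ d := fun a ha => hsub.mem ha
  have hvin : ∀ a ∈ d₁, g (R + 1) ≤ g a := by
    intro a ha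
    have hne₁ : d₁ ≠ [] := List.ne_nil_of_mem ha
    obtain ⟨x, hx⟩ := Option.ne_none_iff_exists'.mp (fun h => hne₁ (List.getLast?_eq_none_iff.mp h))
    have hpx : p x = false := popBack_getLast_not hx
    have hgx : g (R + 1) < g x := by
      simp only [hp, decide_eq_false_iff_not, not_le] at hpx; exact hpx
    rcases pairwise_last_rel (hval.sublist hsub) hx a ha with h | h
    · rw [h]; omega
    · omega
  refine ⟨by simp [pvPushG], ?_, ?_, ?_, ?_, ?_⟩
  · rw [pvPushG, List.pairwise_append]
    refine ⟨hlt.sublist hsub, by simp, ?_⟩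
    intro a ha b hb
    simp at hb
    subst hb
    have := hleR a (hmem₁ a ha)
    omega
  · rw [pvPushG, List.pairwise_append]
    refine ⟨hval.sublist hsub, by simp, ?_⟩
    intro a ha b hb
    simp at hb
    subst hb
    exact hvin a ha
  · intro a ha
    rw [pvPushG, List.mem_append] at ha
    rcases ha with ha | ha
    · exact hLb a (hmem₁ a ha)
    · simp at ha
      subst ha
      have hR : R ∈ d := getLast?_mem' hlast
      have := hLb R hR
      omega
  · rw [pvPushG]
    exact List.getLast?_concat
  · intro j h1 h2
    by_cases hj : j = R + 1
    · exact ⟨R + 1, by simp [pvPushG], by omega, by rw [hj]⟩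
    · obtain ⟨a, ha, hja, hga⟩ := hcov j h1 (by omega)
      rcases mem_popBack_or (p := p) ha with h | h
      · exact ⟨a, by rw [pvPushG, List.mem_append]; exact Or.inl h, hja, hga⟩
      · have : g a ≤ g (R + 1) := by simpa [hp] using h
        exact ⟨R + 1, by simp [pvPushG], by have := hleR a ha; omega, by omega⟩

theorem survivor_mem {p : Int → Bool} {d : List Int} {a : Int} (ha : a ∈ d)
    (hpa : p a = false) : a ∈ d.dropWhile p := by
  rw [← List.takeWhile_append_dropWhile (p := p) (l := d), List.mem_append] at ha
  rcases ha with h | h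
  · rw [List.mem_takeWhile_imp h] at hpa; exact absurd hpa (by simp)
  · exact h

theorem DInv_expire {g : Int → Int} {L R c : Int} {d : List Int} (hd : DInv g L R d)
    (h1 : L ≤ c + 1) (h2 : c < R) : DInv g (c + 1) R (pvExpire d c) := by
  obtain ⟨hne, hlt, hval, hLb, hlast, hcov⟩ := hd
  set q : Int → Bool := fun a => decide (a ≤ c) with hq
  set d' := pvExpire d c with hd'
  have hsub : d'.Sublist d := List.dropWhile_sublist q
  have hRd : R ∈ d := getLast?_mem' hlast
  have hRd' : R ∈ d' := survivor_mem hRd (by simp; omega)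
  have hne' : d' ≠ [] := List.ne_nil_of_mem hRd'
  refine ⟨hne', hlt.sublist hsub, hval.sublist hsub, ?_, ?_, ?_⟩
  · intro a ha
    obtain ⟨h, hh⟩ := Option.ne_none_iff_exists'.mp (fun h => hne' (List.head?_eq_none_iff.mp h))
    have hph : q h = false := head?_dropWhile_false hh
    have hch : c + 1 ≤ h := by simp [hq] at hph; omega
    rcases pairwise_head_rel (hlt.sublist hsub) hh a ha with h' | h'
    · omega
    · omega
  · have hsplit : List.takeWhile q d ++ d' = d := List.takeWhile_append_dropWhile
    rw [← hsplit] at hlast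
    rw [List.getLast?_append] at hlast
    cases hgl : d'.getLast? with
    | none => exact absurd (List.getLast?_eq_none_iff.mp hgl) hne'
    | some y =>
      rw [hgl] at hlast
      simp at hlast
      rw [hlast]
  · intro j hj1 hj2
    obtain ⟨a, ha, hja, hga⟩ := hcov j (by omega) hj2
    exact ⟨a, survivor_mem ha (by simp; omega), hja, hga⟩

theorem DInv_slide {g : Int → Int} {L R c : Int} {d : List Int} (hd : DInv g L R d)
    (h1 : L ≤ c + 1) (h2 : c ≤ R) : DInv g (c + 1) (R + 1) (pvPushG g (pvExpire d c) (R + 1)) := by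
  rcases lt_or_eq_of_le h2 with h | h
  · exact DInv_push (DInv_expire hd h1 h)
  · obtain ⟨hne, hlt, hval, hLb, hlast, hcov⟩ := hd
    have hall : ∀ a ∈ d, a ≤ c := by
      intro a ha
      rcases pairwise_last_rel hlt hlast a ha with h' | h' <;> omega
    have hnil : pvExpire d c = [] := by
      rw [pvExpire, List.dropWhile_eq_nil_iff]
      intro x hx
      simp
      exact hall x hx
    rw [hnil]
    have : pvPushG g [] (R + 1) = [R + 1] := by rfl
    rw [this, ← h]
    exact DInv_singleton g (c + 1)

theorem DInv_extract {g : Int → Int} {L R : Int} {d : List Int} (hd : DInv g L R d) :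
    L ≤ d.headD 0 ∧ d.headD 0 ≤ R ∧ ∀ j, L ≤ j → j ≤ R → g j ≤ g (d.headD 0) := by
  obtain ⟨hne, hlt, hval, hLb, hlast, hcov⟩ := hd
  obtain ⟨h, hh⟩ := Option.ne_none_iff_exists'.mp (fun h => hne (List.head?_eq_none_iff.mp h))
  have hhD : d.headD 0 = h := by
    cases d with
    | nil => simp at hh
    | cons a t => simp at hh; simp [hh]
  rw [hhD]
  have hhd : h ∈ d := head?_mem' hh
  have hR : R ∈ d := getLast?_mem' hlast
  refine ⟨hLb h hhd, ?_, ?_⟩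
  · rcases pairwise_head_rel hlt hh R hR with h' | h' <;> omega
  · intro j hj1 hj2
    obtain ⟨a, ha, hja, hga⟩ := hcov j hj1 hj2
    rcases pairwise_head_rel hval hh a ha with h' | h'
    · rw [← h']; exact hga
    · omega

-- characterisation of B's inner window scan: it computes the max and the min of g on [i-k+1, i]
def pvScanF (nums : List Int) : Int × Int → Int → Int × Int :=
  fun hl j => let v := pvG nums j;
    (if v > hl.1 then v else hl.1, if v < hl.2 then v else hl.2)

theorem scanFold_spec (nums : List Int) :
    ∀ (t : Nat) (a b h l : Int), b - a = (t : Int) →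
    ∀ r, r = (PySem.List.pyRange a b).foldl (pvScanF nums) (h, l) →
    ((r.1 = h ∨ ∃ j, a ≤ j ∧ j < b ∧ pvG nums j = r.1) ∧ h ≤ r.1 ∧
      (∀ j, a ≤ j → j < b → pvG nums j ≤ r.1)) ∧
    ((r.2 = l ∨ ∃ j, a ≤ j ∧ j < b ∧ pvG nums j = r.2) ∧ r.2 ≤ l ∧
      (∀ j, a ≤ j → j < b → r.2 ≤ pvG nums j)) := by
  intro t
  induction t with
  | zero =>
    intro a b h l hab r hr
    rw [PySem.List.pyRange_one_eq_nil (by omega), List.foldl_nil] at hr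
    subst hr
    refine ⟨⟨Or.inl rfl, le_refl h, ?_⟩, Or.inl rfl, le_refl l, ?_⟩ <;>
      (intro j hj1 hj2; omega)
  | succ t ih =>
    intro a b h l hab r hr
    rw [PySem.List.pyRange_one_cons (by omega), List.foldl_cons] at hr
    have hstep : pvScanF nums (h, l) a =
        (if pvG nums a > h then pvG nums a else h,
         if pvG nums a < l then pvG nums a else l) := rfl
    rw [hstep] at hr
    obtain ⟨⟨hm1, hm2, hm3⟩, hn1, hn2, hn3⟩ :=
      ih (a + 1) b (if pvG nums a > h then pvG nums a else h)
        (if pvG nums a < l then pvG nums a else l) (by omega) r hr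
    constructor
    · refine ⟨?_, ?_, ?_⟩
      · rcases hm1 with hm1 | ⟨j, hj1, hj2, hj3⟩
        · by_cases hc : pvG nums a > h
          · rw [if_pos hc] at hm1
            exact Or.inr ⟨a, by omega, by omega, hm1.symm⟩
          · rw [if_neg hc] at hm1
            exact Or.inl hm1
        · exact Or.inr ⟨j, by omega, hj2, hj3⟩
      · have : h ≤ if pvG nums a > h then pvG nums a else h := by split <;> omega
        omega
      · intro j hj1 hj2
        rcases eq_or_lt_of_le hj1 with hj | hj
        · have : pvG nums j ≤ if pvG nums a > h then pvG nums a else h := by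
            rw [← hj]; split <;> omega
          omega
        · exact hm3 j (by omega) hj2
    · refine ⟨?_, ?_, ?_⟩
      · rcases hn1 with hn1 | ⟨j, hj1, hj2, hj3⟩
        · by_cases hc : pvG nums a < l
          · rw [if_pos hc] at hn1
            exact Or.inr ⟨a, by omega, by omega, hn1.symm⟩
          · rw [if_neg hc] at hn1
            exact Or.inl hn1
        · exact Or.inr ⟨j, by omega, hj2, hj3⟩
      · have : (if pvG nums a < l then pvG nums a else l) ≤ l := by split <;> omega
        omega
      · intro j hj1 hj2
        rcases eq_or_lt_of_le hj1 with hj | hj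
        · have : (if pvG nums a < l then pvG nums a else l) ≤ pvG nums j := by
            rw [← hj]; split <;> omega
          omega
        · exact hn3 j (by omega) hj2

theorem winScan_spec (nums : List Int) (k i : Int) (hk : 1 ≤ k) :
    ((∃ j, i - k + 1 ≤ j ∧ j ≤ i ∧ pvG nums j = (pvWinScan nums k i).1) ∧
      (∀ j, i - k + 1 ≤ j → j ≤ i → pvG nums j ≤ (pvWinScan nums k i).1)) ∧
    ((∃ j, i - k + 1 ≤ j ∧ j ≤ i ∧ pvG nums j = (pvWinScan nums k i).2) ∧
      (∀ j, i - k + 1 ≤ j → j ≤ i → (pvWinScan nums k i).2 ≤ pvG nums j)) := by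
  obtain ⟨⟨hm1, hm2, hm3⟩, hn1, hn2, hn3⟩ :=
    scanFold_spec nums (k - 1).toNat (i - k + 1) i (pvG nums i) (pvG nums i) (by omega)
      (pvWinScan nums k i) rfl
  constructor
  · constructor
    · rcases hm1 with hm1 | ⟨j, hj1, hj2, hj3⟩
      · exact ⟨i, by omega, by omega, hm1.symm⟩
      · exact ⟨j, hj1, by omega, hj3⟩
    · intro j hj1 hj2
      rcases eq_or_lt_of_le hj2 with hj | hj
      · rw [hj]; exact hm2
      · exact hm3 j hj1 hj
  · constructor
    · rcases hn1 with hn1 | ⟨j, hj1, hj2, hj3⟩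
      · exact ⟨i, by omega, by omega, hn1.symm⟩
      · exact ⟨j, hj1, by omega, hj3⟩
    · intro j hj1 hj2
      rcases eq_or_lt_of_le hj2 with hj | hj
      · rw [hj]; exact hn2
      · exact hn3 j hj1 hj

theorem heads_eq_winScan (nums : List Int) (k R : Int) (hk : 1 ≤ k)
    {dm dn : List Int} (hm : DInv (pvG nums) (R - k + 1) R dm)
    (hn : DInv (fun j => -(pvG nums j)) (R - k + 1) R dn) :
    pvG nums (dm.headD 0) + pvG nums (dn.headD 0) =
      (pvWinScan nums k R).1 + (pvWinScan nums k R).2 := by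
  obtain ⟨⟨⟨jm, hjm1, hjm2, hjm3⟩, hmax⟩, ⟨jn, hjn1, hjn2, hjn3⟩, hmin⟩ := winScan_spec nums k R hk
  obtain ⟨hm1, hm2, hm3⟩ := DInv_extract hm
  obtain ⟨hn1, hn2, hn3⟩ := DInv_extract hn
  have e1 : pvG nums (dm.headD 0) = (pvWinScan nums k R).1 := by
    have h1 : pvG nums (dm.headD 0) ≤ (pvWinScan nums k R).1 := hmax _ hm1 hm2
    have h2 : (pvWinScan nums k R).1 ≤ pvG nums (dm.headD 0) := by
      rw [← hjm3]; exact hm3 jm hjm1 hjm2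
    omega
  have e2 : pvG nums (dn.headD 0) = (pvWinScan nums k R).2 := by
    have h1 : (pvWinScan nums k R).2 ≤ pvG nums (dn.headD 0) := hmin _ hn1 hn2
    have h2 : pvG nums (dn.headD 0) ≤ (pvWinScan nums k R).2 := by
      rw [← hjn3]
      have := hn3 jn hjn1 hjn2
      omega
    omega
  omega

-- phase 1: after A's first loop the deques satisfy the invariant for window [0, m-1]
theorem phase1_inv (nums : List Int) (m : Int) (hm : 1 ≤ m) :
    DInv (pvG nums) 0 (m - 1) ((PySem.List.pyRange 0 m).foldl (pvStep1 nums) ([], [])).1 ∧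
    DInv (fun j => -(pvG nums j)) 0 (m - 1)
      ((PySem.List.pyRange 0 m).foldl (pvStep1 nums) ([], [])).2 := by
  induction m, hm using Int.le_induction with
  | base =>
    have h01 : PySem.List.pyRange 0 (1 : Int) = [0] := by
      rw [PySem.List.pyRange_one_cons (by omega), PySem.List.pyRange_one_eq_nil (by omega)]
    rw [h01]
    simp only [List.foldl_cons, List.foldl_nil]
    have hmax : (pvStep1 nums ([], []) 0).1 = [0] := rfl
    have hmin : (pvStep1 nums ([], []) 0).2 = [0] := rfl
    rw [hmax, hmin]
    norm_num
    exact ⟨DInv_singleton _ 0, DInv_singleton _ 0⟩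
  | succ m hm ih =>
    rw [PySem.List.pyRange_one_succ_right (by omega), List.foldl_append]
    simp only [List.foldl_cons, List.foldl_nil]
    obtain ⟨ih1, ih2⟩ := ih
    constructor
    · show DInv (pvG nums) 0 (m + 1 - 1) (pvPushMax nums _ m)
      rw [pushMax_eq]
      have := DInv_push (g := pvG nums) (R := m - 1) ih1
      have hm1 : m - 1 + 1 = m := by omega
      rw [hm1] at this
      have hm2 : m + 1 - 1 = m := by omega
      rw [hm2]
      exact this
    · show DInv (fun j => -(pvG nums j)) 0 (m + 1 - 1) (pvPushMin nums _ m)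
      rw [pushMin_eq]
      have := DInv_push (g := fun j => -(pvG nums j)) (R := m - 1) ih2
      have hm1 : m - 1 + 1 = m := by omega
      rw [hm1] at this
      have hm2 : m + 1 - 1 = m := by omega
      rw [hm2]
      exact this

-- phase 2: the loop state after processing range(k, i)
theorem phase2_inv (nums : List Int) (k : Int) (hk : 1 ≤ k) (i : Int) (hi : k ≤ i)
    (st0 : List Int × List Int)
    (h0 : DInv (pvG nums) 0 (k - 1) st0.1 ∧ DInv (fun j => -(pvG nums j)) 0 (k - 1) st0.2) :
    DInv (pvG nums) (i - k) (i - 1)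
        ((PySem.List.pyRange k i).foldl (pvStep2 nums k) (st0.1, st0.2, 0)).1 ∧
    DInv (fun j => -(pvG nums j)) (i - k) (i - 1)
        ((PySem.List.pyRange k i).foldl (pvStep2 nums k) (st0.1, st0.2, 0)).2.1 ∧
    ((PySem.List.pyRange k i).foldl (pvStep2 nums k) (st0.1, st0.2, 0)).2.2 =
      (PySem.List.pyRange (k - 1) (i - 1)).foldl
        (fun ans i => let hl := pvWinScan nums k i; ans + (hl.1 + hl.2)) 0 := by
  induction i, hi using Int.le_induction with
  | base =>
    rw [PySem.List.pyRange_one_eq_nil (le_refl k), PySem.List.pyRange_one_eq_nil (by omega)]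
    simp only [List.foldl_nil]
    have e0 : k - k = (0 : Int) := by omega
    rw [e0]
    exact ⟨h0.1, h0.2, trivial⟩
  | succ i hi ih =>
    obtain ⟨ih1, ih2, ih3⟩ := ih
    rw [PySem.List.pyRange_one_succ_right (by omega), List.foldl_append]
    simp only [List.foldl_cons, List.foldl_nil]
    set st := (PySem.List.pyRange k i).foldl (pvStep2 nums k) (st0.1, st0.2, 0) with hst
    have hslide1 : DInv (pvG nums) (i + 1 - k) (i + 1 - 1) (pvStep2 nums k st i).1 := by
      show DInv _ _ _ (pvPushMax nums (pvExpire st.1 (i - k)) i)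
      rw [pushMax_eq]
      have := DInv_slide (g := pvG nums) (R := i - 1) (c := i - k) ih1 (by omega) (by omega)
      have e1 : i - k + 1 = i + 1 - k := by omega
      have e2 : i - 1 + 1 = i := by omega
      rw [e1, e2] at this
      have e3 : i + 1 - 1 = i := by omega
      rw [e3]
      exact this
    have hslide2 : DInv (fun j => -(pvG nums j)) (i + 1 - k) (i + 1 - 1) (pvStep2 nums k st i).2.1 := by
      show DInv _ _ _ (pvPushMin nums (pvExpire st.2.1 (i - k)) i)
      rw [pushMin_eq]
      have := DInv_slide (g := fun j => -(pvG nums j)) (R := i - 1) (c := i - k) ih2 (by omega) (by omega)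
      have e1 : i - k + 1 = i + 1 - k := by omega
      have e2 : i - 1 + 1 = i := by omega
      rw [e1, e2] at this
      have e3 : i + 1 - 1 = i := by omega
      rw [e3]
      exact this
    refine ⟨hslide1, hslide2, ?_⟩
    show st.2.2 + pvG nums (st.1.headD 0) + pvG nums (st.2.1.headD 0) = _
    have hw : pvG nums (st.1.headD 0) + pvG nums (st.2.1.headD 0) =
        (pvWinScan nums k (i - 1)).1 + (pvWinScan nums k (i - 1)).2 := by
      have e1 : i - 1 - k + 1 = i - k := by omega
      refine heads_eq_winScan nums k (i - 1) hk ?_ ?_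
      · rw [e1]; exact ih1
      · rw [e1]; exact ih2
    have e4 : i + 1 - 1 = i - 1 + 1 := by omega
    rw [e4, PySem.List.pyRange_one_succ_right (by omega), List.foldl_append]
    simp only [List.foldl_cons, List.foldl_nil]
    rw [← ih3]
    omega

-- ===== VERDICT (by name: the statement is the Claim_ definition above) =====
theorem bLoop_eq_fold (nums : List Int) (k n : Int) :
    ∀ (t : Nat) (e ans : Int), (n - (e + 1)).toNat = t → e < n →
    pvBLoop nums k n e ans =
      (PySem.List.pyRange e n).foldl
        (fun a i => let hl := pvWinScan nums k i; a + (hl.1 + hl.2)) ans := by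
  intro t
  induction t with
  | zero =>
    intro e ans ht he
    rw [pvBLoop]
    have hn : n = e + 1 := by omega
    rw [if_neg (by omega)]
    rw [hn, PySem.List.pyRange_one_succ_right (by omega),
      PySem.List.pyRange_one_eq_nil (le_refl e)]
    simp only [List.nil_append, List.foldl_cons, List.foldl_nil]
  | succ t ih =>
    intro e ans ht he
    rw [pvBLoop]
    rw [if_pos (by omega)]
    rw [PySem.List.pyRange_one_cons he, List.foldl_cons]
    exact ih (e + 1) _ (by omega) (by omega)

theorem sum_of_max_and_min_spec : Claim_equal_sum_of_max_and_min := by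
  intro nums n k _ hpre
  have hk : 1 ≤ k := hpre.1
  obtain ⟨h01, h02⟩ := phase1_inv nums k hk
  set st0 := (PySem.List.pyRange 0 k).foldl (pvStep1 nums) ([], []) with hst0
  show sum_of_max_and_min nums n k = sum_of_max_and_min_alt nums n k
  by_cases hkn : k ≤ n
  · -- at least one full slide: the second loop runs over range(k, n)
    obtain ⟨h1, h2, h3⟩ := phase2_inv nums k hk n hkn _ ⟨h01, h02⟩
    set st := (PySem.List.pyRange k n).foldl (pvStep2 nums k) (st0.1, st0.2, 0) with hst
    have hA : sum_of_max_and_min nums n k =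
        st.2.2 + pvG nums (st.1.headD 0) + pvG nums (st.2.1.headD 0) := rfl
    have hB : sum_of_max_and_min_alt nums n k =
        (PySem.List.pyRange (k - 1) n).foldl
          (fun a i => let hl := pvWinScan nums k i; a + (hl.1 + hl.2)) 0 :=
      bLoop_eq_fold nums k n _ (k - 1) 0 rfl (by omega)
    have hw : pvG nums (st.1.headD 0) + pvG nums (st.2.1.headD 0) =
        (pvWinScan nums k (n - 1)).1 + (pvWinScan nums k (n - 1)).2 := by
      have e1 : n - 1 - k + 1 = n - k := by omega
      refine heads_eq_winScan nums k (n - 1) hk ?_ ?_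
      · rw [e1]; exact h1
      · rw [e1]; exact h2
    have e : PySem.List.pyRange (k - 1) n = PySem.List.pyRange (k - 1) (n - 1) ++ [n - 1] := by
      have h := PySem.List.pyRange_one_succ_right (a := k - 1) (b := n - 1) (by omega)
      rw [show n - 1 + 1 = n from by omega] at h
      exact h
    rw [hA, hB, e, List.foldl_append]
    simp only [List.foldl_cons, List.foldl_nil]
    rw [← h3]
    omega
  · -- n < k: A's second loop is empty and it returns the first window's max+min;
    -- B's do-while adds the window ending at k-1 once and stops
    have hA : sum_of_max_and_min nums n k =
        0 + pvG nums (st0.1.headD 0) + pvG nums (st0.2.headD 0) := by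
      show ((PySem.List.pyRange k n).foldl (pvStep2 nums k) (st0.1, st0.2, 0)).2.2 +
          pvG nums (((PySem.List.pyRange k n).foldl (pvStep2 nums k) (st0.1, st0.2, 0)).1.headD 0) +
          pvG nums (((PySem.List.pyRange k n).foldl (pvStep2 nums k) (st0.1, st0.2, 0)).2.1.headD 0) = _
      rw [PySem.List.pyRange_one_eq_nil (by omega), List.foldl_nil]
    have hB : sum_of_max_and_min_alt nums n k =
        0 + ((pvWinScan nums k (k - 1)).1 + (pvWinScan nums k (k - 1)).2) := by
      show pvBLoop nums k n (k - 1) 0 = _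
      rw [pvBLoop, if_neg (by omega)]
    have hw : pvG nums (st0.1.headD 0) + pvG nums (st0.2.headD 0) =
        (pvWinScan nums k (k - 1)).1 + (pvWinScan nums k (k - 1)).2 := by
      have e1 : k - 1 - k + 1 = (0 : Int) := by omega
      refine heads_eq_winScan nums k (k - 1) hk ?_ ?_
      · rw [e1]; exact h01
      · rw [e1]; exact h02
    rw [hA, hB]
    omega
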